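-- pv_equiv track=rewrite | github.com/Krish-Ramalingam/CascadeV4 | servantAlgorithms/exprEval.py | tokeniseLogicalExpression
-- ===== SOURCE A (Python) =====
-- def tokeniseLogicalExpression(expr):
--     """
--     Tokenises a logical expression into variables, operators, and parentheses.
--     Args:
--         expr (str): The logical expression as a string.
--     Returns:
--         list: A list of tokens (variables and operators).
--     """
--     tokens = []
--     current_variable = ''
--
--     i = 0
--     while i < len(expr):
--         char = expr[i]
--         if char.isalpha():
--             current_variable += char
--         else:
--             if current_variable:
--                 tokens.append(("var", current_variable))
--                 current_variable = ''
--             if expr[i:i+2] in ['&&', '||', '==', '!=', '<=', '>=']: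
--                 tokens.append((expr[i:i+2], None))
--                 i += 1
--             elif char in '!<>()':
--                 tokens.append((char, None))
--         i += 1
--
--     if current_variable:
--         tokens.append(("var", current_variable))
--
--     return tokens
-- ===== SOURCE B (Python) =====
-- def tokeniseLogicalExpression(expr):
--     """Maximal-munch scanner: consume a whole letter-run or operator per step."""
--     tokens = []
--     n = len(expr)
--     i = 0
--     while i < n:
--         ch = expr[i]
--         if ch.isalpha():
--             j = i + 1
--             while j < n and expr[j].isalpha():
--                 j += 1
--             tokens.append(("var", expr[i:j]))
--             i = j
--         elif expr[i:i+2] in ('&&', '||', '==', '!=', '<=', '>='):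
--             tokens.append((expr[i:i+2], None))
--             i += 2
--         elif ch in '!<>()':
--             tokens.append((ch, None))
--             i += 1
--         else:
--             i += 1
--     return tokens
-- ===== Notes on version B (the rewrite author's own statement) =====
-- stated objective: faster
-- what changed: Replaces A's char-by-char accumulator state machine (current_variable grown with += and flushed on every non-letter) with a stateless maximal-munch scanner that slices out a whole letter-run or operator per step and emits the token directly.
import Mathlib
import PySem

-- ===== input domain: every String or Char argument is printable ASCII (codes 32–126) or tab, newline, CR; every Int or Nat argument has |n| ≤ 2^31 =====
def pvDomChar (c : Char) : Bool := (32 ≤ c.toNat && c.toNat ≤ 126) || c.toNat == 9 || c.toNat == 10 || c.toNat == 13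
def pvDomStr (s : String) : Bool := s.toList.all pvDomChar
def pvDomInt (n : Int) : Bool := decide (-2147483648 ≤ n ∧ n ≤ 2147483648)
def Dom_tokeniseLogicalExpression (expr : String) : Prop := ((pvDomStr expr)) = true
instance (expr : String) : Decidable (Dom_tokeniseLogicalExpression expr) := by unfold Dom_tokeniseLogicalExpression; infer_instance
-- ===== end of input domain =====

-- B replaces A's char-by-char accumulator state machine with a stateless maximal-munch
-- scanner (whole letter-run or operator consumed per step); same O(n) cost, simpler flow.

-- ===== PORT A =====
-- the two-char operator slices expr[i:i+2], as lists of chars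
def pvOps2 : List (List Char) :=
  [['&','&'], ['|','|'], ['=','='], ['!','='], ['<','='], ['>','=']]

-- Python's "if current_variable: tokens.append(("var", current_variable))"
def pvFlush (toks : List (String × Option String)) (cur : List Char) :
    List (String × Option String) :=
  if cur = [] then toks else toks ++ [("var", some (String.ofList cur))]

-- A's while loop: one recursive call per iteration; `cur` is current_variable (char list),
-- `toks` the growing tokens list; a matched two-char operator drops one extra char (i += 1 twice).
def pvTokA : List Char → List (String × Option String) → List Char → List (String × Option String)
  | [], toks, cur => pvFlush toks cur
  | c :: rest, toks, cur =>
    if PySem.Chars.isalpha c then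
      pvTokA rest toks (cur ++ [c])
    else
      let toks1 := pvFlush toks cur
      if (c :: rest.take 1) ∈ pvOps2 then
        pvTokA rest.tail (toks1 ++ [(String.ofList (c :: rest.take 1), none)]) []
      else if c ∈ ['!', '<', '>', '(', ')'] then
        pvTokA rest (toks1 ++ [(String.ofList [c], none)]) []
      else
        pvTokA rest toks1 []
  termination_by cs => cs.length
  decreasing_by all_goals simp

def tokeniseLogicalExpression (expr : String) : List (String × Option String) :=
  pvTokA expr.toList [] []

-- ===== PORT B =====
-- B's tuple of two-char operators
def pvOpsB : List (List Char) :=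
  [['&','&'], ['|','|'], ['=','='], ['!','='], ['<','='], ['>','=']]

-- B's while loop: at each position emit one whole token (maximal letter run via the inner
-- j-scan = takeWhile, or a two-char / one-char operator) and recurse past it.
def pvTokB : List Char → List (String × Option String)
  | [] => []
  | c :: rest =>
    if PySem.Chars.isalpha c then
      ("var", some (String.ofList (c :: rest.takeWhile PySem.Chars.isalpha)))
        :: pvTokB (rest.dropWhile PySem.Chars.isalpha)
    else if (c :: rest.take 1) ∈ pvOpsB then
      (String.ofList (c :: rest.take 1), none) :: pvTokB rest.tail
    else if c ∈ ['!', '<', '>', '(', ')'] then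
      (String.ofList [c], none) :: pvTokB rest
    else
      pvTokB rest
  termination_by cs => cs.length
  decreasing_by all_goals first
    | (simp; done)
    | (have := List.length_dropWhile_le PySem.Chars.isalpha rest; simp; omega)

def tokeniseLogicalExpression_alt (expr : String) : List (String × Option String) :=
  pvTokB expr.toList

-- ===== PRECONDITION & SPEC =====
def Spec_tokeniseLogicalExpression (expr : String) (out : List (String × Option String)) : Prop := out = tokeniseLogicalExpression_alt expr
instance (expr : String) (out : List (String × Option String)) : Decidable (Spec_tokeniseLogicalExpression expr out) := by unfold Spec_tokeniseLogicalExpression; infer_instance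

-- ===== CLAIM (what is proved, stated in full; the proofs are below) =====
def Claim_equal_tokeniseLogicalExpression : Prop := ∀ (expr : String), Dom_tokeniseLogicalExpression expr → Spec_tokeniseLogicalExpression expr (tokeniseLogicalExpression expr)

-- ===== LEMMAS AND PROOFS =====

theorem pvOpsB_eq : pvOpsB = pvOps2 := rfl

theorem pvFlush_eq (toks : List (String × Option String)) (cur : List Char) :
    pvFlush toks cur = toks ++ pvFlush [] cur := by
  by_cases hc : cur = [] <;> simp [pvFlush, hc]

-- the tokens accumulator only gets appended to
theorem pvTokA_append (n : Nat) : ∀ (cs : List Char), cs.length ≤ n →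
    ∀ toks cur, pvTokA cs toks cur = toks ++ pvTokA cs [] cur := by
  induction n with
  | zero =>
    intro cs h toks cur
    match cs, h with
    | [], _ => simp only [pvTokA]; exact pvFlush_eq toks cur
  | succ n ih =>
    intro cs h toks cur
    match cs with
    | [] => simp only [pvTokA]; exact pvFlush_eq toks cur
    | c :: rest =>
      have hr : rest.length ≤ n := by simpa using Nat.lt_succ_iff.mp (by simpa using h)
      have ht : rest.tail.length ≤ n := le_trans (by simp [List.length_tail]) hr
      simp only [pvTokA]
      by_cases ha : PySem.Chars.isalpha c
      · simp only [ha, if_true]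
        rw [ih rest hr toks]
      · simp only [ha, Bool.false_eq_true, if_false]
        rw [pvFlush_eq toks cur]
        by_cases h1 : (c :: rest.take 1) ∈ pvOps2
        · simp only [h1, if_true]
          rw [ih rest.tail ht, ih rest.tail ht (pvFlush [] cur ++ _)]
          simp
        · simp only [h1, if_false]
          by_cases h2 : c ∈ ['!', '<', '>', '(', ')']
          · simp only [h2, if_true]
            rw [ih rest hr, ih rest hr (pvFlush [] cur ++ _)]
            simp
          · simp only [h2, if_false]
            rw [ih rest hr, ih rest hr (pvFlush [] cur)]
            simp

-- main invariant: A's loop with pending run `cur` = flush the run (extended by the maximal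
-- letter prefix of cs) then continue as B's scanner
theorem pvTok_key (n : Nat) : ∀ (cs : List Char), cs.length ≤ n → ∀ cur,
    pvTokA cs [] cur =
      if cur = [] then pvTokB cs
      else ("var", some (String.ofList (cur ++ cs.takeWhile PySem.Chars.isalpha)))
             :: pvTokB (cs.dropWhile PySem.Chars.isalpha) := by
  induction n with
  | zero =>
    intro cs h cur
    match cs, h with
    | [], _ => by_cases hc : cur = [] <;> simp [pvTokA, pvTokB, pvFlush, hc]
  | succ n ih =>
    intro cs h cur
    match cs with
    | [] => by_cases hc : cur = [] <;> simp [pvTokA, pvTokB, pvFlush, hc]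
    | c :: rest =>
      have hr : rest.length ≤ n := by simpa using Nat.lt_succ_iff.mp (by simpa using h)
      have ht : rest.tail.length ≤ n := le_trans (by simp [List.length_tail]) hr
      by_cases ha : PySem.Chars.isalpha c
      · rw [show pvTokA (c :: rest) [] cur = pvTokA rest [] (cur ++ [c]) by
            simp [pvTokA, ha]]
        rw [ih rest hr (cur ++ [c])]
        simp only [List.append_eq_nil_iff]
        by_cases hc : cur = []
        · subst hc; simp [pvTokB, ha]
        · simp [hc, ha]
      · -- non-letter head: flush, then both sides do the same operator step
        have hstep : pvTokA (c :: rest) [] cur =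
            pvFlush [] cur ++ pvTokB (c :: rest) := by
          simp only [pvTokA, ha, Bool.false_eq_true, if_false]
          by_cases h1 : (c :: rest.take 1) ∈ pvOps2
          · simp only [h1, if_true]
            rw [pvTokA_append n rest.tail ht, ih rest.tail ht []]
            simp [pvTokB, ha, pvOpsB_eq, h1]
          · simp only [h1, if_false]
            by_cases h2 : c ∈ ['!', '<', '>', '(', ')']
            · simp only [h2, if_true]
              rw [pvTokA_append n rest hr, ih rest hr []]
              simp [pvTokB, ha, pvOpsB_eq, h1, h2]
            · simp only [h2, if_false]
              rw [pvTokA_append n rest hr, ih rest hr []]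
              simp [pvTokB, ha, pvOpsB_eq, h1, h2]
        rw [hstep]
        by_cases hc : cur = []
        · simp [hc, pvFlush]
        · simp [hc, pvFlush, ha]

-- ===== VERDICT (by name: the statement is the Claim_ definition above) =====
theorem tokeniseLogicalExpression_spec : Claim_equal_tokeniseLogicalExpression := by
  intro expr _
  unfold Spec_tokeniseLogicalExpression tokeniseLogicalExpression tokeniseLogicalExpression_alt
  simpa using pvTok_key expr.toList.length expr.toList le_rfl []
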